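-- pv_equiv track=rewrite | github.com/gabriellaec/desoft-analise-exercicios | backup/user_119/ch76_2019_06_06_20_18_10_079275.py | aniversariantes_de_setembro
-- ===== SOURCE A (Python) =====
-- def aniversariantes_de_setembro(dicio):
--     setembro = {}
--     nomes = []
--     datas = []
--     for n,d in dicio.items():
--         nomes.append(n)
--         datas.append(d)
--     i=0
--     while i <len(datas):
--         if datas[i][3:5]=="09":
--             setembro[nomes[i]] = datas[i]
--         i+=1
--     return setembro
-- ===== SOURCE B (Python) =====
-- def aniversariantes_de_setembro(dicio):
--     por_mes = {}
--     for n, d in dicio.items():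
--         por_mes.setdefault(d[3:5], {})[n] = d
--     return por_mes.get("09", {})
-- ===== Notes on version B (the rewrite author's own statement) =====
-- stated objective: alternative
-- what changed: B groups every entry into per-month buckets (a dict of dicts keyed by the month slice) in one pass and returns the '09' bucket, whereas A makes two staged passes: it copies keys and dates into two parallel lists, then an index-driven while loop tests each date and rebuilds a dict front-to-back.
import Mathlib
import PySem

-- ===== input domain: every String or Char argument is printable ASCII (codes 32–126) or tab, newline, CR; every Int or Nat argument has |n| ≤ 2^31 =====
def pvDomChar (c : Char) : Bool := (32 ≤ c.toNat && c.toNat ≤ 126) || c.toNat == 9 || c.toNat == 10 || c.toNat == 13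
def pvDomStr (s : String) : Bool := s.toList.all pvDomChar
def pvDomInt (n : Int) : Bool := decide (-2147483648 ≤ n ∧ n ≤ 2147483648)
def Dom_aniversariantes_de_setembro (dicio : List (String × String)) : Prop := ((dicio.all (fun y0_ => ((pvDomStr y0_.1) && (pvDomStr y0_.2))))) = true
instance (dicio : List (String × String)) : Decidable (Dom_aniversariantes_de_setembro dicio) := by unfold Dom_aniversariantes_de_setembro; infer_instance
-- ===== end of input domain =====

-- One honest line: B replaces A's two staged passes (parallel name/date lists, then an
-- index-driven while loop rebuilding a dict) by a single grouping pass into per-month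
-- buckets, returning the "09" bucket; alternative algorithm, same result.

-- ===== PORT A =====
-- the 'while i < len(datas)' loop; decreases on datas.length - i
def pvWhileA (nomes datas : List String) (i : Nat) (setembro : PySem.Dict String String) :
    PySem.Dict String String :=
  if h : i < datas.length then
    let setembro' :=
      if PySem.Str.slice (PySem.List.pyGetD datas (i : Int) "") (some 3) (some 5) == "09" then
        setembro.insert (PySem.List.pyGetD nomes (i : Int) "") (PySem.List.pyGetD datas (i : Int) "")
      else setembro
    pvWhileA nomes datas (i + 1) setembro'
  else setembro
termination_by datas.length - i

def aniversariantes_de_setembro (dicio : List (String × String)) : List (String × String) :=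
  let setembro : PySem.Dict String String := PySem.Dict.empty
  let nd := dicio.foldl
    (fun (st : List String × List String) p => (st.1 ++ [p.1], st.2 ++ [p.2])) ([], [])
  (pvWhileA nd.1 nd.2 0 setembro).items

-- ===== PORT B =====
-- the grouping loop: por_mes.setdefault(d[3:5], {})[n] = d  is  modify at key d[3:5]
def pvGroup (dicio : List (String × String)) : PySem.Dict String (PySem.Dict String String) :=
  dicio.foldl
    (fun por_mes p =>
      por_mes.modify (PySem.Str.slice p.2 (some 3) (some 5)) PySem.Dict.empty
        (fun m => m.insert p.1 p.2))
    PySem.Dict.empty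

def aniversariantes_de_setembro_alt (dicio : List (String × String)) : List (String × String) :=
  ((pvGroup dicio).getD "09" PySem.Dict.empty).items

-- ===== PRECONDITION & SPEC =====
-- Pre_ excludes association lists with duplicate keys: such inputs do not arise
-- from a Python dict (dict.items() yields unique keys), so the corner is an
-- artefact of the List encoding, not an input A ever returns on.
def Pre_aniversariantes_de_setembro (dicio : List (String × String)) : Prop :=
  (dicio.map Prod.fst).Nodup
instance (dicio : List (String × String)) : Decidable (Pre_aniversariantes_de_setembro dicio) := by
  unfold Pre_aniversariantes_de_setembro; infer_instance

def pvWitness_aniversariantes_de_setembro : (List (String × String)) :=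
  [("ana", "03/09/2000"), ("bia", "10/10/1999"), ("caio", "25/09/1998")]

def Spec_aniversariantes_de_setembro (dicio : List (String × String)) (out : List (String × String)) : Prop := out = aniversariantes_de_setembro_alt dicio
instance (dicio : List (String × String)) (out : List (String × String)) : Decidable (Spec_aniversariantes_de_setembro dicio out) := by unfold Spec_aniversariantes_de_setembro; infer_instance

-- ===== CLAIM (what is proved, stated in full; the proofs are below) =====
def Claim_equal_aniversariantes_de_setembro : Prop := ∀ (dicio : List (String × String)), Dom_aniversariantes_de_setembro dicio → Pre_aniversariantes_de_setembro dicio → Spec_aniversariantes_de_setembro dicio (aniversariantes_de_setembro dicio)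

-- ===== LEMMAS AND PROOFS =====

-- the condition tested by both programs
def pvCond (d : String) : Bool := PySem.Str.slice d (some 3) (some 5) == "09"

-- the 'for n,d in dicio.items()' accumulation builds the two projection lists
theorem pvFoldPair (l : List (String × String)) (a b : List String) :
    l.foldl (fun (st : List String × List String) p => (st.1 ++ [p.1], st.2 ++ [p.2])) (a, b)
      = (a ++ l.map Prod.fst, b ++ l.map Prod.snd) := by
  induction l generalizing a b with
  | nil => simp
  | cons x xs ih => simp [List.foldl, ih]

-- the while loop over the projection lists is the conditional-insert fold over the tail
theorem pvWhileA_eq (l : List (String × String)) (i : Nat) (d : PySem.Dict String String) :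
    pvWhileA (l.map Prod.fst) (l.map Prod.snd) i d
      = (l.drop i).foldl (fun d p => if pvCond p.2 then d.insert p.1 p.2 else d) d := by
  by_cases h : i < l.length
  · have hdrop : l.drop i = l[i] :: l.drop (i + 1) := List.drop_eq_getElem_cons h
    rw [pvWhileA]
    have hn : (PySem.List.pyGetD (l.map Prod.fst) (i : Int) "") = l[i].1 := by
      rw [PySem.List.pyGetD_natCast]
      simp [List.getD_eq_getElem?_getD, h]
    have hd : (PySem.List.pyGetD (l.map Prod.snd) (i : Int) "") = l[i].2 := by
      rw [PySem.List.pyGetD_natCast]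
      simp [List.getD_eq_getElem?_getD, h]
    simp only [List.length_map, h, dif_pos, hn, hd]
    rw [pvWhileA_eq l (i + 1)]
    rw [hdrop, List.foldl_cons, pvCond]
  · have h1 : l.length ≤ i := Nat.le_of_not_lt h
    rw [pvWhileA]
    simp only [List.length_map, dif_neg h]
    rw [List.drop_eq_nil_of_le h1, List.foldl_nil]
termination_by l.length - i

-- with pairwise-distinct keys A's conditional-insert fold just appends the kept pairs
set_option maxHeartbeats 1000000 in
theorem pvFoldInsert_eq (l : List (String × String))
    (hnd : (l.map Prod.fst).Nodup) :
    (l.foldl (fun d p => if pvCond p.2 then d.insert p.1 p.2 else d)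
      (PySem.Dict.empty : PySem.Dict String String)).items
      = l.filter (fun p => pvCond p.2) := by
  rw [PySem.List.foldl_if_eq_foldl_filter]
  have hsub : ((l.filter (fun p => pvCond p.2)).map Prod.fst).Sublist (l.map Prod.fst) :=
    List.Sublist.map Prod.fst List.filter_sublist
  have hnd' : ((l.filter (fun p => pvCond p.2)).map Prod.fst).Nodup := hsub.nodup hnd
  have := PySem.Dict.items_foldl_insert_fresh (β := String × String) (l.filter (fun p => pvCond p.2))
      Prod.fst Prod.snd (PySem.Dict.empty : PySem.Dict String String)
      (by intro a _; exact PySem.Dict.contains_empty a.1) hnd'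
  rw [this]
  simp [PySem.Dict.empty]

-- the grouping fold, observed at one bucket c, is the insert fold over the entries
-- whose month slice is c
theorem pvBucket (l : List (String × String)) (g : PySem.Dict String (PySem.Dict String String))
    (c : String) :
    ((l.foldl
        (fun por_mes p =>
          por_mes.modify (PySem.Str.slice p.2 (some 3) (some 5)) PySem.Dict.empty
            (fun m => m.insert p.1 p.2)) g).getD c PySem.Dict.empty)
      = (l.filter (fun p => PySem.Str.slice p.2 (some 3) (some 5) == c)).foldl
          (fun m p => m.insert p.1 p.2) (g.getD c PySem.Dict.empty) := by
  induction l generalizing g with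
  | nil => simp
  | cons x xs ih =>
    rw [List.foldl_cons, ih, List.filter_cons, PySem.Dict.getD_modify]
    by_cases hx : PySem.Str.slice x.2 (some 3) (some 5) = c
    · simp [hx]
    · simp [hx, Ne.symm hx]

-- with pairwise-distinct keys B's "09" bucket holds exactly the kept pairs in order
theorem pvGroup_items (l : List (String × String))
    (hnd : (l.map Prod.fst).Nodup) :
    ((pvGroup l).getD "09" PySem.Dict.empty).items = l.filter (fun p => pvCond p.2) := by
  unfold pvGroup
  rw [pvBucket, PySem.Dict.getD_empty]
  have hsub : ((l.filter (fun p => pvCond p.2)).map Prod.fst).Sublist (l.map Prod.fst) :=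
    List.Sublist.map Prod.fst List.filter_sublist
  have := PySem.Dict.items_foldl_insert_fresh (β := String × String)
      (l.filter (fun p => pvCond p.2)) Prod.fst Prod.snd
      (PySem.Dict.empty : PySem.Dict String String)
      (by intro a _; exact PySem.Dict.contains_empty a.1) (hsub.nodup hnd)
  simp only [pvCond] at this ⊢
  rw [this]
  simp [PySem.Dict.empty]

set_option maxHeartbeats 1000000 in
theorem aniversariantes_de_setembro_eq (dicio : List (String × String))
    (hnd : (dicio.map Prod.fst).Nodup) :
    aniversariantes_de_setembro dicio = aniversariantes_de_setembro_alt dicio := by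
  unfold aniversariantes_de_setembro aniversariantes_de_setembro_alt
  rw [pvFoldPair dicio [] []]
  simp only [List.nil_append]
  rw [pvWhileA_eq dicio 0, List.drop_zero, pvFoldInsert_eq dicio hnd, pvGroup_items dicio hnd]

-- ===== VERDICT (by name: the statement is the Claim_ definition above) =====
theorem aniversariantes_de_setembro_spec : Claim_equal_aniversariantes_de_setembro := by
  intro dicio _ hpre
  exact aniversariantes_de_setembro_eq dicio hpre
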